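-- pv_equiv track=rewrite | github.com/kieker-monitoring/GGVIS | tulipviz/TulipClusterGrouper.py | longest_common_dotpath_prefix
-- ===== SOURCE A (Python) =====
-- def longest_common_dotpath_prefix(label1, label2):
--     """Returns the longest common dot-separated prefix between two labels."""
--     parts1 = label1.split(".")
--     parts2 = label2.split(".")
--     common_parts = []
--     for p1, p2 in zip(parts1, parts2):
--         if p1 == p2:
--             common_parts.append(p1)
--         else:
--             break
--     return ".".join(common_parts)
-- ===== SOURCE B (Python) =====
-- def longest_common_dotpath_prefix(label1, label2):
--     """Returns the longest common dot-separated prefix between two labels."""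
--     # Character-level scan: find the longest common character prefix, then
--     # cut it back to a dot-component boundary (no splitting/joining of parts).
--     k = 0
--     n = min(len(label1), len(label2))
--     while k < n and label1[k] == label2[k]:
--         k += 1
--     ok1 = k == len(label1) or label1[k] == "."
--     ok2 = k == len(label2) or label2[k] == "."
--     if ok1 and ok2:
--         return label1[:k]
--     return label1[:k].rpartition(".")[0]
-- ===== Notes on version B (the rewrite author's own statement) =====
-- stated objective: alternative
-- what changed: B replaces A's split-into-components / zip-compare / re-join pipeline by a single character-level scan that finds the longest common character prefix and then cuts it back to the last dot-component boundary, never materialising the component lists.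
import Mathlib
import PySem

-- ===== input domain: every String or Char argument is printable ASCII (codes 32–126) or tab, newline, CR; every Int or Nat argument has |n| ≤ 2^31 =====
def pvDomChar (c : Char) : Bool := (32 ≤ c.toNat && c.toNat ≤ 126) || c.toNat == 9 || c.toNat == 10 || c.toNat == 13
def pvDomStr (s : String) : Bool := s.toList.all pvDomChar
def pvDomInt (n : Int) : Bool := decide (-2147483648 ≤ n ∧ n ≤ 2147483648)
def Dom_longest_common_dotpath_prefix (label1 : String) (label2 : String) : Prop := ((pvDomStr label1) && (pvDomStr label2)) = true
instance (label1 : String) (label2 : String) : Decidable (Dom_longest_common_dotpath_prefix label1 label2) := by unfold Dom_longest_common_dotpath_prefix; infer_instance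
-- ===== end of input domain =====

-- B replaces A's split/zip/join over component lists by a single character-level scan
-- plus a boundary cut-back (objective: alternative algorithm, similar cost).

-- ===== PORT A =====
-- the 'for p1, p2 in zip(parts1, parts2): if p1 == p2: append else break' loop
def pvGoA : List (List Char) → List (List Char) → List (List Char)
  | p1 :: r1, p2 :: r2 => if p1 = p2 then p1 :: pvGoA r1 r2 else []
  | _, _ => []

def longest_common_dotpath_prefix (label1 : String) (label2 : String) : String :=
  let parts1 := PySem.Chars.splitOn label1.toList ['.']
  let parts2 := PySem.Chars.splitOn label2.toList ['.']
  let common_parts := pvGoA parts1 parts2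
  String.ofList (PySem.Chars.join ['.'] common_parts)

-- ===== PORT B =====
-- the 'while k < n and label1[k] == label2[k]: k += 1' scan
def pvCommonLen : List Char → List Char → Nat
  | a :: x, b :: y => if a = b then pvCommonLen x y + 1 else 0
  | _, _ => 0

-- 'k == len(s) or s[k] == "."' (exact: when k < len(s), s[k] is cs[k]?)
def pvBoundary (cs : List Char) (k : Nat) : Bool := k == cs.length || cs[k]? == some '.'

-- s.rpartition(".")[0]: everything before the LAST '.', or "" if there is none (exact)
def pvBeforeLastDot (cs : List Char) : List Char :=
  (((cs.reverse.dropWhile (· ≠ '.')).drop 1)).reverse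

def longest_common_dotpath_prefix_alt (label1 : String) (label2 : String) : String :=
  let cs1 := label1.toList
  let cs2 := label2.toList
  let k := pvCommonLen cs1 cs2
  if pvBoundary cs1 k && pvBoundary cs2 k then String.ofList (cs1.take k)
  else String.ofList (pvBeforeLastDot (cs1.take k))

-- ===== PRECONDITION & SPEC =====
def Spec_longest_common_dotpath_prefix (label1 : String) (label2 : String) (out : String) : Prop := out = longest_common_dotpath_prefix_alt label1 label2
instance (label1 : String) (label2 : String) (out : String) : Decidable (Spec_longest_common_dotpath_prefix label1 label2 out) := by unfold Spec_longest_common_dotpath_prefix; infer_instance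

-- ===== CLAIM (what is proved, stated in full; the proofs are below) =====
def Claim_equal_longest_common_dotpath_prefix : Prop := ∀ (label1 : String) (label2 : String), Dom_longest_common_dotpath_prefix label1 label2 → Spec_longest_common_dotpath_prefix label1 label2 (longest_common_dotpath_prefix label1 label2)

-- ===== LEMMAS AND PROOFS =====

-- structural reference version of splitting on '.'
def mySplit : List Char → List (List Char)
  | [] => [[]]
  | c :: r => if c = '.' then [] :: mySplit r
              else match mySplit r with
                   | h :: t => (c :: h) :: t
                   | [] => [[c]]

theorem mySplit_ne_nil (x : List Char) : mySplit x ≠ [] := by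
  cases x with
  | nil => simp [mySplit]
  | cons c r => simp only [mySplit]; split
                · simp
                · split <;> simp_all

def pvTW (x : List Char) : List Char := x.takeWhile (· ≠ '.')

theorem pvTW_cons (c : Char) (r : List Char) :
    pvTW (c :: r) = if c = '.' then [] else c :: pvTW r := by
  by_cases hc : c = '.' <;> simp [pvTW, List.takeWhile_cons, hc]

theorem mySplit_head (x : List Char) :
    ∃ t, mySplit x = pvTW x :: t := by
  induction x with
  | nil => exact ⟨[], rfl⟩
  | cons c r ih =>
    obtain ⟨t, ht⟩ := ih
    by_cases hc : c = '.'
    · subst hc; exact ⟨mySplit r, by simp [mySplit, pvTW_cons]⟩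
    · refine ⟨t, ?_⟩
      simp [mySplit, hc, ht, pvTW_cons]

theorem splitOn_go_eq : ∀ (fuel : Nat) (l : List Char), l.length ≤ fuel →
    ∀ (cur : List Char) (acc : List (List Char)),
    PySem.Chars.splitOn.go ['.'] fuel l cur acc =
      acc.reverse ++ (match mySplit l with
                      | h :: t => (cur.reverse ++ h) :: t
                      | [] => [cur.reverse]) := by
  intro fuel
  induction fuel with
  | zero =>
    intro l hl cur acc
    have : l = [] := List.length_eq_zero_iff.mp (Nat.le_zero.mp hl)
    subst this
    simp [PySem.Chars.splitOn.go, mySplit]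
  | succ f ih =>
    intro l hl cur acc
    cases l with
    | nil => simp [PySem.Chars.splitOn.go, mySplit]
    | cons c rest =>
      rw [PySem.Chars.splitOn.go]
      have hrest : rest.length ≤ f := by simpa using hl
      by_cases hc : c = '.'
      · subst hc
        have hpre : List.isPrefixOf ['.'] ('.' :: rest) = true := by
          simp [List.isPrefixOf]
        rw [if_pos hpre]
        rw [show List.drop ['.'].length ('.' :: rest) = rest from rfl]
        rw [ih rest hrest [] (cur.reverse :: acc)]
        obtain ⟨h, t, hm⟩ := List.exists_cons_of_ne_nil (mySplit_ne_nil rest)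
        simp [mySplit, hm]
      · have hpre : List.isPrefixOf ['.'] (c :: rest) = false := by
          simp [List.isPrefixOf]; exact fun h => absurd h.symm hc
        rw [if_neg (by simp [hpre])]
        rw [ih rest hrest (c :: cur) acc]
        obtain ⟨h, t, hm⟩ := List.exists_cons_of_ne_nil (mySplit_ne_nil rest)
        simp [mySplit, hc, hm]

theorem splitOn_eq (x : List Char) : PySem.Chars.splitOn x ['.'] = mySplit x := by
  rw [PySem.Chars.splitOn, splitOn_go_eq (x.length + 1) x (by omega) [] []]
  obtain ⟨h, t, hm⟩ := List.exists_cons_of_ne_nil (mySplit_ne_nil x)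
  simp [hm]

-- list-level form of port B
def altL (x y : List Char) : List Char :=
  if pvBoundary x (pvCommonLen x y) && pvBoundary y (pvCommonLen x y) then
    x.take (pvCommonLen x y)
  else pvBeforeLastDot (x.take (pvCommonLen x y))

theorem alt_eq (l1 l2 : String) :
    longest_common_dotpath_prefix_alt l1 l2 = String.ofList (altL l1.toList l2.toList) := by
  simp only [longest_common_dotpath_prefix_alt, altL, apply_ite String.ofList]

theorem boundary_shift (c : Char) (x : List Char) (k : Nat) :
    pvBoundary (c :: x) (k + 1) = pvBoundary x k := by
  simp [pvBoundary]

theorem commonLen_cons (c : Char) (x y : List Char) :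
    pvCommonLen (c :: x) (c :: y) = pvCommonLen x y + 1 := by
  simp [pvCommonLen]

theorem bld_cons_no_dot (c : Char) (xs : List Char) (h : '.' ∉ xs) :
    pvBeforeLastDot (c :: xs) = [] := by
  have hall : xs.reverse.dropWhile (· ≠ '.') = [] := by
    rw [List.dropWhile_eq_nil_iff]
    intro a ha
    simp only [List.mem_reverse] at ha
    simp only [ne_eq, decide_eq_true_eq]
    rintro rfl
    exact h ha
  simp only [pvBeforeLastDot, List.reverse_cons, List.dropWhile_append, hall]
  by_cases hc : c = '.' <;> simp [hc, List.dropWhile]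

theorem bld_cons_dot (c : Char) (xs : List Char) (h : '.' ∈ xs) :
    pvBeforeLastDot (c :: xs) = c :: pvBeforeLastDot xs := by
  have hne : xs.reverse.dropWhile (· ≠ '.') ≠ [] := by
    rw [Ne, List.dropWhile_eq_nil_iff]
    push_neg
    exact ⟨'.', List.mem_reverse.mpr h, by simp⟩
  obtain ⟨a, d, hd⟩ := List.exists_cons_of_ne_nil hne
  simp only [pvBeforeLastDot, List.reverse_cons, List.dropWhile_append, hd]
  simp [hd]

theorem tw_ne (x : List Char) : ∀ (y : List Char),
    pvTW x ≠ pvTW y →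
    '.' ∉ x.take (pvCommonLen x y) ∧
      ¬(pvBoundary x (pvCommonLen x y) = true ∧ pvBoundary y (pvCommonLen x y) = true) := by
  induction x with
  | nil =>
    intro y h
    cases y with
    | nil => simp at h
    | cons b r2 =>
      by_cases hb : b = '.'
      · subst hb; rw [pvTW_cons, if_pos rfl] at h; simp [pvTW] at h
      · refine ⟨by simp [pvCommonLen], ?_⟩
        rintro ⟨-, h2⟩
        simp [pvCommonLen, pvBoundary, hb] at h2
  | cons a r1 ih =>
    intro y h
    cases y with
    | nil =>
      by_cases ha : a = '.'
      · subst ha; rw [pvTW_cons, if_pos rfl] at h; simp [pvTW] at h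
      · refine ⟨by simp [pvCommonLen], ?_⟩
        rintro ⟨h1, -⟩
        simp [pvCommonLen, pvBoundary, ha] at h1
    | cons b r2 =>
      by_cases hab : a = b
      · subst hab
        by_cases ha : a = '.'
        · subst ha; rw [pvTW_cons, if_pos rfl, pvTW_cons, if_pos rfl] at h; exact absurd rfl h
        · have h' : pvTW r1 ≠ pvTW r2 := by
            intro he; apply h
            rw [pvTW_cons, if_neg ha, pvTW_cons, if_neg ha, he]
          obtain ⟨hdot, hbd⟩ := ih r2 h'
          rw [commonLen_cons]
          refine ⟨?_, ?_⟩
          · intro hmem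
            rw [List.take_succ_cons] at hmem
            rcases List.mem_cons.mp hmem with hc | hc
            · exact ha hc.symm
            · exact hdot hc
          · rw [boundary_shift, boundary_shift]; exact hbd
      · have hk : pvCommonLen (a :: r1) (b :: r2) = 0 := by simp [pvCommonLen, hab]
        rw [hk]
        refine ⟨by simp, ?_⟩
        rintro ⟨h1, h2⟩
        simp [pvBoundary] at h1 h2
        exact hab (h1.trans h2.symm)

theorem tw_eq (x : List Char) : ∀ (y : List Char),
    pvTW x = pvTW y →
    (pvBoundary x (pvCommonLen x y) = true ∧ pvBoundary y (pvCommonLen x y) = true) ∨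
      '.' ∈ x.take (pvCommonLen x y) := by
  induction x with
  | nil =>
    intro y h
    left
    cases y with
    | nil => simp [pvCommonLen, pvBoundary]
    | cons b r2 =>
      have hb : b = '.' := by
        by_contra hb
        rw [pvTW_cons, if_neg hb] at h
        simp [pvTW] at h
      subst hb
      simp [pvCommonLen, pvBoundary]
  | cons a r1 ih =>
    intro y h
    cases y with
    | nil =>
      left
      have ha : a = '.' := by
        by_contra ha
        rw [pvTW_cons, if_neg ha] at h
        simp [pvTW] at h
      subst ha
      simp [pvCommonLen, pvBoundary]
    | cons b r2 =>
      by_cases hab : a = b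
      · subst hab
        by_cases ha : a = '.'
        · subst ha
          right
          rw [commonLen_cons, List.take_succ_cons]
          exact List.mem_cons_self
        · have h' : pvTW r1 = pvTW r2 := by
            rw [pvTW_cons, if_neg ha, pvTW_cons, if_neg ha] at h
            simp only [List.cons.injEq, true_and] at h; exact h
          rw [commonLen_cons]
          rcases ih r2 h' with ⟨h1, h2⟩ | hdot
          · left; rw [boundary_shift, boundary_shift]; exact ⟨h1, h2⟩
          · right; rw [List.take_succ_cons]; exact List.mem_cons_of_mem _ hdot
      · exfalso
        by_cases ha : a = '.'
        · subst ha
          have hb : b ≠ '.' := fun hb => hab hb.symm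
          rw [pvTW_cons, if_pos rfl, pvTW_cons, if_neg hb] at h
          simp at h
        · by_cases hb : b = '.'
          · subst hb
            rw [pvTW_cons, if_neg ha, pvTW_cons, if_pos rfl] at h
            simp at h
          · rw [pvTW_cons, if_neg ha, pvTW_cons, if_neg hb] at h
            simp only [List.cons.injEq] at h; exact hab h.1

theorem join_cons_head (a : Char) (h : List Char) (t : List (List Char)) :
    PySem.Chars.join ['.'] ((a :: h) :: t) = a :: PySem.Chars.join ['.'] (h :: t) := by
  cases t with
  | nil => simp [PySem.Chars.join, List.intercalate]
  | cons u t' => simp [PySem.Chars.join, List.intercalate]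

theorem main_eq (x : List Char) : ∀ (y : List Char),
    PySem.Chars.join ['.'] (pvGoA (mySplit x) (mySplit y)) = altL x y := by
  induction x with
  | nil =>
    intro y
    obtain ⟨t, ht⟩ := mySplit_head y
    have lhs : PySem.Chars.join ['.'] (pvGoA (mySplit []) (mySplit y)) = [] := by
      rw [ht]; simp only [mySplit, pvGoA]
      split
      · simp [pvGoA, PySem.Chars.join, List.intercalate]
      · simp [PySem.Chars.join, List.intercalate]
    rw [lhs, altL]
    have hk : pvCommonLen [] y = 0 := by simp [pvCommonLen]
    rw [hk]
    split <;> simp [pvBeforeLastDot]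
  | cons a r1 ih =>
    intro y
    cases y with
    | nil =>
      obtain ⟨t, ht⟩ := mySplit_head (a :: r1)
      have lhs : PySem.Chars.join ['.'] (pvGoA (mySplit (a :: r1)) (mySplit [])) = [] := by
        rw [ht]; simp only [mySplit, pvGoA]
        split
        · rename_i heq
          have : pvGoA t [] = [] := by cases t <;> rfl
          simp [this, ← heq, PySem.Chars.join, List.intercalate]
        · simp [PySem.Chars.join, List.intercalate]
      rw [lhs, altL]
      have hk : pvCommonLen (a :: r1) [] = 0 := by simp [pvCommonLen]
      rw [hk]
      split <;> simp [pvBeforeLastDot]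
    | cons b r2 =>
      obtain ⟨t1, ht1⟩ := mySplit_head r1
      obtain ⟨t2, ht2⟩ := mySplit_head r2
      by_cases hab : a = b
      · subst hab
        rw [altL, commonLen_cons, boundary_shift, boundary_shift]
        by_cases hh : pvTW r1 = pvTW r2
        -- first residual components equal: both sides extend the recursive value by a
        · have hg : pvGoA (mySplit r1) (mySplit r2) =
              pvTW r1 :: pvGoA t1 t2 := by
            rw [ht1, ht2, ← hh]; simp [pvGoA]
          have hrec := ih r2
          by_cases ha : a = '.'
          · subst ha
            have lhs : PySem.Chars.join ['.'] (pvGoA (mySplit ('.' :: r1)) (mySplit ('.' :: r2)))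
                = '.' :: PySem.Chars.join ['.'] (pvGoA (mySplit r1) (mySplit r2)) := by
              simp only [mySplit, eq_self_iff_true, if_true]
              rw [show pvGoA ([] :: mySplit r1) ([] :: mySplit r2)
                    = [] :: pvGoA (mySplit r1) (mySplit r2) from by simp [pvGoA]]
              rw [hg]
              simp [PySem.Chars.join, List.intercalate]
            rw [lhs, hrec]
            rcases tw_eq r1 r2 hh with ⟨h1, h2⟩ | hdot
            · rw [if_pos (by simp [h1, h2])]
              rw [altL, if_pos (by simp [h1, h2])]
              rw [List.take_succ_cons]
            · by_cases hbd : pvBoundary r1 (pvCommonLen r1 r2) = true ∧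
                  pvBoundary r2 (pvCommonLen r1 r2) = true
              · rw [if_pos (by simp [hbd.1, hbd.2]), altL, if_pos (by simp [hbd.1, hbd.2])]
                rw [List.take_succ_cons]
              · rw [if_neg (by simpa using hbd), altL, if_neg (by simpa using hbd)]
                rw [List.take_succ_cons, bld_cons_dot _ _ hdot]
          · have lhs : PySem.Chars.join ['.'] (pvGoA (mySplit (a :: r1)) (mySplit (a :: r2)))
                = a :: PySem.Chars.join ['.'] (pvGoA (mySplit r1) (mySplit r2)) := by
              simp only [mySplit, if_neg ha]
              rw [ht1, ht2, ← hh]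
              show PySem.Chars.join ['.'] (pvGoA ((a :: pvTW r1) :: t1) ((a :: pvTW r1) :: t2))
                  = a :: PySem.Chars.join ['.'] (pvGoA (pvTW r1 :: t1) (pvTW r1 :: t2))
              rw [show pvGoA ((a :: pvTW r1) :: t1) ((a :: pvTW r1) :: t2)
                    = (a :: pvTW r1) :: pvGoA t1 t2 from by simp [pvGoA],
                  show pvGoA (pvTW r1 :: t1) (pvTW r1 :: t2)
                    = pvTW r1 :: pvGoA t1 t2 from by simp [pvGoA]]
              exact join_cons_head a _ _
            rw [lhs, hrec]
            by_cases hbd : pvBoundary r1 (pvCommonLen r1 r2) = true ∧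
                pvBoundary r2 (pvCommonLen r1 r2) = true
            · rw [if_pos (by simp [hbd.1, hbd.2]), altL, if_pos (by simp [hbd.1, hbd.2])]
              rw [List.take_succ_cons]
            · rcases tw_eq r1 r2 hh with h | hdot
              · exact absurd h hbd
              · rw [if_neg (by simpa using hbd), altL, if_neg (by simpa using hbd)]
                rw [List.take_succ_cons, bld_cons_dot _ _ hdot]
        -- first residual components differ: both sides are empty past a
        · obtain ⟨hdot, hbd⟩ := tw_ne r1 r2 hh
          have lhs : PySem.Chars.join ['.'] (pvGoA (mySplit (a :: r1)) (mySplit (a :: r2))) = [] := by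
            by_cases ha : a = '.'
            · subst ha
              simp only [mySplit, if_pos rfl, pvGoA, if_pos rfl]
              rw [ht1, ht2]
              simp [pvGoA, hh, PySem.Chars.join, List.intercalate]
            · simp only [mySplit, if_neg ha]
              rw [ht1, ht2]
              have : (a :: pvTW r1) ≠ (a :: pvTW r2) := by
                simp [hh]
              simp [pvGoA, this, PySem.Chars.join, List.intercalate]
          rw [lhs, if_neg (by simpa using hbd)]
          rw [List.take_succ_cons, bld_cons_no_dot _ _ hdot]
      -- leading characters differ: result is empty both ways
      · have hk : pvCommonLen (a :: r1) (b :: r2) = 0 := by simp [pvCommonLen, hab]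
        have lhs : PySem.Chars.join ['.'] (pvGoA (mySplit (a :: r1)) (mySplit (b :: r2))) = [] := by
          by_cases ha : a = '.' <;> by_cases hb : b = '.'
          · exact absurd (ha.trans hb.symm) hab
          · subst ha
            simp only [mySplit, if_pos rfl, if_neg hb]
            rw [ht2]
            simp [pvGoA, PySem.Chars.join, List.intercalate]
          · subst hb
            simp only [mySplit, if_pos rfl, if_neg ha]
            rw [ht1]
            simp [pvGoA, PySem.Chars.join, List.intercalate]
          · simp only [mySplit, if_neg ha, if_neg hb]
            rw [ht1, ht2]
            have : (a :: pvTW r1) ≠ (b :: pvTW r2) := by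
              simp [hab]
            simp [pvGoA, this, PySem.Chars.join, List.intercalate]
        rw [lhs, altL, hk]
        have hnb : ¬(pvBoundary (a :: r1) 0 = true ∧ pvBoundary (b :: r2) 0 = true) := by
          rintro ⟨h1, h2⟩
          simp [pvBoundary] at h1 h2
          exact hab (h1.trans h2.symm)
        rw [if_neg (by simpa using hnb)]
        simp [pvBeforeLastDot]

-- ===== VERDICT (by name: the statement is the Claim_ definition above) =====
theorem longest_common_dotpath_prefix_spec : Claim_equal_longest_common_dotpath_prefix := by
  intro l1 l2 _
  unfold Spec_longest_common_dotpath_prefix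
  rw [alt_eq]
  simp only [longest_common_dotpath_prefix]
  rw [splitOn_eq, splitOn_eq, main_eq]
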